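-- pv_equiv track=rewrite | github.com/vgm64/menu_item_extraction | ExtractMenuUsingPhrases.py | ExtractMenuItemUsingPrefixPhrases
-- ===== SOURCE A (Python) =====
-- def ExtractMenuItemUsingPrefixPhrases(sentencetokens,phrase):
--     len_of_item = 2
--     ntokens = len(sentencetokens)
--     theitems = []
--     for i,token in enumerate(sentencetokens):
--             if i+len(phrase)+len_of_item < len(sentencetokens) and phrase == sentencetokens[i:i+len(phrase)]:
--                 #we found a match for the phrase as a prefix
--                 theitems.append(sentencetokens[i+len(phrase):i+len(phrase)+len_of_item])
--     return theitems
-- ===== SOURCE B (Python) =====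
-- def ExtractMenuItemUsingPrefixPhrases(sentencetokens, phrase):
--     m = len(phrase)
--     theitems = []
--     rest = sentencetokens
--     while len(rest) > m + 2:
--         if rest[:m] == phrase:
--             theitems.append(rest[m:m+2])
--         rest = rest[1:]
--     return theitems
-- ===== Notes on version B (the rewrite author's own statement) =====
-- stated objective: alternative
-- what changed: Replaces the index-based enumerate loop that slices the full list at absolute indices with a while-loop that walks the suffixes of the token list, comparing the phrase against each suffix's prefix and taking the next two tokens directly.
import Mathlib
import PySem

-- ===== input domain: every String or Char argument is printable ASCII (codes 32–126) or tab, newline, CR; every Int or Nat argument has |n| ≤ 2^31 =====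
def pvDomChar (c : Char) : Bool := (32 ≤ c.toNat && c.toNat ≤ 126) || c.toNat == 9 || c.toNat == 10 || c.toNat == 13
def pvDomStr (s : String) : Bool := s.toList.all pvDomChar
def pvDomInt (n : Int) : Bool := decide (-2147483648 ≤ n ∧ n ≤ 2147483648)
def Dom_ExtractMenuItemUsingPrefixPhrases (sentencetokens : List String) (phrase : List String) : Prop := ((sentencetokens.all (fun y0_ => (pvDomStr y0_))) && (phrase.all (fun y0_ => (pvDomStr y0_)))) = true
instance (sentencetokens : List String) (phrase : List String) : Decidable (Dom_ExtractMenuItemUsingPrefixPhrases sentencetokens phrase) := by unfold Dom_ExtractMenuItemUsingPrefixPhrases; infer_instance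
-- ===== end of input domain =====

-- B replaces A's index-based enumerate-and-slice loop by a walk over the suffixes of the
-- token list (alternative decomposition, same return value; no speed claim).

-- ===== PORT A =====
def ExtractMenuItemUsingPrefixPhrases (sentencetokens : List String) (phrase : List String) : List (List String) :=
  let len_of_item : Int := 2
  let _ntokens := sentencetokens.length   -- A's unused 'ntokens'
  (PySem.List.enumerate sentencetokens).foldl
    (fun theitems it =>
      if it.1 + (phrase.length : Int) + len_of_item < (sentencetokens.length : Int) ∧
         phrase = PySem.List.slice sentencetokens (some it.1) (some (it.1 + (phrase.length : Int))) then
        theitems ++ [PySem.List.slice sentencetokens (some (it.1 + (phrase.length : Int)))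
                       (some (it.1 + (phrase.length : Int) + len_of_item))]
      else theitems) []

-- ===== PORT B =====
-- the while-loop of Source B: walk the suffixes 'rest' of the token list
def pvAltGo (phrase : List String) (rest : List String) : List (List String) :=
  if rest.length > phrase.length + 2 then
    (if rest.take phrase.length = phrase then [(rest.drop phrase.length).take 2] else []) ++
      pvAltGo phrase rest.tail
  else []
termination_by rest.length
decreasing_by simp [List.length_tail]; omega

def ExtractMenuItemUsingPrefixPhrases_alt (sentencetokens : List String) (phrase : List String) : List (List String) :=
  pvAltGo phrase sentencetokens

-- ===== PRECONDITION & SPEC =====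
def Spec_ExtractMenuItemUsingPrefixPhrases (sentencetokens : List String) (phrase : List String) (out : List (List String)) : Prop := out = ExtractMenuItemUsingPrefixPhrases_alt sentencetokens phrase
instance (sentencetokens : List String) (phrase : List String) (out : List (List String)) : Decidable (Spec_ExtractMenuItemUsingPrefixPhrases sentencetokens phrase out) := by unfold Spec_ExtractMenuItemUsingPrefixPhrases; infer_instance

-- ===== CLAIM (what is proved, stated in full; the proofs are below) =====
def Claim_equal_ExtractMenuItemUsingPrefixPhrases : Prop := ∀ (sentencetokens : List String) (phrase : List String), Dom_ExtractMenuItemUsingPrefixPhrases sentencetokens phrase → Spec_ExtractMenuItemUsingPrefixPhrases sentencetokens phrase (ExtractMenuItemUsingPrefixPhrases sentencetokens phrase)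

-- ===== LEMMAS AND PROOFS =====

-- canonical form both ports are reduced to
def pvSpecList (s p : List String) : List (List String) :=
  ((List.range s.length).filter
      (fun k => decide (k + p.length + 2 < s.length ∧ p = (s.drop k).take p.length))).map
    (fun k => (s.drop (k + p.length)).take 2)

lemma pvEnumFold {α : Type} (xs : List String) (Q : Int → Bool) (G : Int → α) :
    ((PySem.List.enumerate xs).filter (fun it => Q it.1)).map (fun it => G it.1)
      = ((List.range xs.length).filter (fun k : Nat => Q (k : Int))).map (fun k : Nat => G (k : Int)) := by
  calc ((PySem.List.enumerate xs).filter (fun it => Q it.1)).map (fun it => G it.1)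
      = (((PySem.List.enumerate xs).map Prod.fst).filter Q).map G := by
        rw [List.filter_map, List.map_map]; rfl
    _ = ((PySem.List.pyRange 0 ((0 : Int) + xs.length)).filter Q).map G := by
        rw [PySem.List.map_fst_enumerate]
    _ = (((List.range xs.length).map (fun k : Nat => (k : Int))).filter Q).map G := by
        rw [zero_add, PySem.List.pyRange_zero_natCast]
    _ = ((List.range xs.length).filter (fun k : Nat => Q (k : Int))).map (fun k : Nat => G (k : Int)) := by
        rw [List.filter_map, List.map_map]; rfl

lemma pvA_eq (s p : List String) :
    ExtractMenuItemUsingPrefixPhrases s p = pvSpecList s p := by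
  have h0 : ExtractMenuItemUsingPrefixPhrases s p
      = (PySem.List.enumerate s).foldl
          (fun theitems it =>
            if it.1 + (p.length : Int) + 2 < (s.length : Int) ∧
               p = PySem.List.slice s (some it.1) (some (it.1 + (p.length : Int))) then
              theitems ++ [PySem.List.slice s (some (it.1 + (p.length : Int)))
                             (some (it.1 + (p.length : Int) + 2))]
            else theitems) [] := rfl
  have hfun : (fun (theitems : List (List String)) (it : Int × String) =>
        if it.1 + (p.length : Int) + 2 < (s.length : Int) ∧
           p = PySem.List.slice s (some it.1) (some (it.1 + (p.length : Int))) then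
          theitems ++ [PySem.List.slice s (some (it.1 + (p.length : Int)))
                         (some (it.1 + (p.length : Int) + 2))]
        else theitems)
      = (fun theitems it =>
          if (fun (it : Int × String) => decide (it.1 + (p.length : Int) + 2 < (s.length : Int) ∧
               p = PySem.List.slice s (some it.1) (some (it.1 + (p.length : Int))))) it = true then
            theitems ++ [(fun (it : Int × String) => PySem.List.slice s (some (it.1 + (p.length : Int)))
                           (some (it.1 + (p.length : Int) + 2))) it]
          else theitems) := by
    funext acc it
    simp only [decide_eq_true_eq]
  rw [h0, hfun, PySem.List.foldl_append_if, List.nil_append,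
      pvEnumFold s
        (fun i => decide (i + (p.length : Int) + 2 < (s.length : Int) ∧
           p = PySem.List.slice s (some i) (some (i + (p.length : Int)))))
        (fun i => PySem.List.slice s (some (i + (p.length : Int)))
           (some (i + (p.length : Int) + 2)))]
  unfold pvSpecList
  have hq : (fun (k : Nat) => decide ((k : Int) + (p.length : Int) + 2 < (s.length : Int) ∧
        p = PySem.List.slice s (some (k : Int)) (some ((k : Int) + (p.length : Int)))))
      = (fun (k : Nat) => decide (k + p.length + 2 < s.length ∧ p = (s.drop k).take p.length)) := by
    funext k
    rw [PySem.List.slice_natCast_add]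
    rw [decide_eq_decide]
    constructor <;> rintro ⟨h1, h2⟩ <;> exact ⟨by exact_mod_cast h1, h2⟩
  have hg : (fun (k : Nat) => PySem.List.slice s (some ((k : Int) + (p.length : Int)))
        (some ((k : Int) + (p.length : Int) + 2)))
      = (fun (k : Nat) => (s.drop (k + p.length)).take 2) := by
    funext k
    have h1 : ((k : Int) + (p.length : Int)) = ((k + p.length : Nat) : Int) := by push_cast; ring
    rw [h1, show (2 : Int) = ((2 : Nat) : Int) from by norm_num, PySem.List.slice_natCast_add]
  rw [hq, hg]

lemma pvSpecList_cons (x : String) (t p : List String) :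
    pvSpecList (x :: t) p
      = (if p.length + 2 < t.length + 1 ∧ p = (x :: t).take p.length
          then [((x :: t).drop p.length).take 2] else [])
        ++ pvSpecList t p := by
  unfold pvSpecList
  rw [show (x :: t).length = t.length + 1 from rfl, List.range_succ_eq_map, List.filter_cons]
  have htail :
      ((List.range t.length).map Nat.succ).filter
          (fun k => decide (k + p.length + 2 < t.length + 1 ∧ p = ((x :: t).drop k).take p.length))
        = ((List.range t.length).filter
            (fun k => decide (k + p.length + 2 < t.length ∧ p = (t.drop k).take p.length))).map Nat.succ := by
    rw [List.filter_map]
    congr 1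
    congr 1
    funext k
    simp only [Function.comp_apply, Nat.succ_eq_add_one, decide_eq_decide, List.drop_succ_cons]
    constructor <;> rintro ⟨h1, h2⟩ <;> exact ⟨by omega, h2⟩
  have hmap : ∀ (l : List Nat),
      (l.map Nat.succ).map (fun k => ((x :: t).drop (k + p.length)).take 2)
        = l.map (fun k => (t.drop (k + p.length)).take 2) := by
    intro l
    rw [List.map_map]
    congr 1
    funext k
    simp only [Function.comp_apply, Nat.succ_eq_add_one]
    have h1 : k + 1 + p.length = (k + p.length) + 1 := by omega
    rw [h1, List.drop_succ_cons]
  by_cases hc : p.length + 2 < t.length + 1 ∧ p = (x :: t).take p.length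
  · have hc' : decide (0 + p.length + 2 < t.length + 1 ∧ p = ((x :: t).drop 0).take p.length) = true := by
      simp only [decide_eq_true_eq, Nat.zero_add, List.drop_zero]
      exact hc
    rw [if_pos hc', if_pos hc, htail, List.map_cons, hmap]
    simp only [Nat.zero_add, List.cons_append, List.nil_append]
  · have hc' : ¬ (decide (0 + p.length + 2 < t.length + 1 ∧ p = ((x :: t).drop 0).take p.length) = true) := by
      simp only [decide_eq_true_eq, Nat.zero_add, List.drop_zero]
      exact hc
    rw [if_neg hc', if_neg hc, htail, hmap, List.nil_append]

lemma pvB_eq (s p : List String) :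
    pvAltGo p s = pvSpecList s p := by
  induction s with
  | nil =>
      rw [pvAltGo]
      simp [pvSpecList]
  | cons x t ih =>
      rw [pvAltGo]
      by_cases h : (x :: t).length > p.length + 2
      · rw [if_pos h, List.tail_cons, ih, pvSpecList_cons]
        have hlen : p.length + 2 < t.length + 1 := by
          simpa using h
        congr 1
        by_cases hc2 : (x :: t).take p.length = p
        · rw [if_pos hc2, if_pos ⟨hlen, hc2.symm⟩]
        · rw [if_neg hc2, if_neg (fun hcon => hc2 hcon.2.symm)]
      · rw [if_neg h]
        symm
        unfold pvSpecList
        have hnil : (List.range (x :: t).length).filter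
            (fun k => decide (k + p.length + 2 < (x :: t).length ∧ p = ((x :: t).drop k).take p.length)) = [] := by
          rw [List.filter_eq_nil_iff]
          intro a _
          simp only [decide_eq_true_eq, not_and]
          intro h1 _
          simp only [List.length_cons] at h h1
          omega
        rw [hnil, List.map_nil]

-- ===== VERDICT (by name: the statement is the Claim_ definition above) =====
theorem ExtractMenuItemUsingPrefixPhrases_spec : Claim_equal_ExtractMenuItemUsingPrefixPhrases := by
  intro s p _
  unfold Spec_ExtractMenuItemUsingPrefixPhrases ExtractMenuItemUsingPrefixPhrases_alt
  rw [pvA_eq, pvB_eq]
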